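-- pv_equiv track=rewrite | github.com/irenezhengg/111-1-Programming | Week12/037.py | susunPalet
-- ===== SOURCE A (Python) =====
-- def susunPalet(palet2: list) -> list:
--     hasil = []
--     insersi = 0
--     ukuran = 1
--     while True:
--         for palet in palet2:
--             if len(palet) == ukuran:
--                 palet.sort()
--                 hasil.append(palet)
--                 insersi += 1
--
--         ukuran += 1
--
--         if insersi == len(palet2):
--             break
--
--     return hasil
-- ===== SOURCE B (Python) =====
-- def susunPalet(palet2: list) -> list:
--     buckets = {}
--     for palet in palet2:
--         palet.sort()
--         buckets.setdefault(len(palet), []).append(palet)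
--     hasil = []
--     for k in sorted(buckets):
--         hasil += buckets[k]
--     return hasil
-- ===== Notes on version B (the rewrite author's own statement) =====
-- stated objective: alternative
-- what changed: single bucketing pass into a length-keyed dict plus one emit pass over the sorted keys, instead of rescanning the whole list once per candidate length 1,2,3,... until every sublist has been emitted
-- outside the precondition, e.g. on susunPalet([[]]): A does not finish within the time limit, B returns [[]]
import Mathlib
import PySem

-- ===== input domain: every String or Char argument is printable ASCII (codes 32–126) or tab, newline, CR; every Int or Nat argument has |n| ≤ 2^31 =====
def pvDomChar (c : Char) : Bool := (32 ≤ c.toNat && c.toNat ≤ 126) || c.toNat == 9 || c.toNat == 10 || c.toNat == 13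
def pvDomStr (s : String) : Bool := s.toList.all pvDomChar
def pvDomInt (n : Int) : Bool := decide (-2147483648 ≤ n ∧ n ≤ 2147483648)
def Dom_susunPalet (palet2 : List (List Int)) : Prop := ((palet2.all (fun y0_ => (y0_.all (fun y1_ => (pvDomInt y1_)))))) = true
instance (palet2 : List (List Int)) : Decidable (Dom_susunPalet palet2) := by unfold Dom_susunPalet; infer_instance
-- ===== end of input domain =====

-- B replaces A's rescans (one full scan per candidate length 1,2,3,…) by one bucketing pass into a
-- length-keyed dict plus one emit pass over the sorted keys (alternative decomposition, same result).
-- Both versions sort the sublists in place in Python; the equivalence proved here is about the return value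
-- (B performs the same in-place mutation as A).

-- ===== PORT A =====
-- palet.sort() sorts a list of ints in place; as a value this is sorted(palet).
def pvSortList (p : List Int) : List Int := PySem.List.sorted p (fun x => x) false

-- the 'while True' loop of A; fuel is a totality device only (one unit per executed round:
-- under Pre_ the loop breaks after at most (max sublist length) rounds, see susunPalet's call)
def susunPaletLoop (palet2 : List (List Int)) (hasil : List (List Int)) (insersi ukuran : Nat) :
    Nat → List (List Int)
  | 0 => hasil
  | fuel + 1 =>
    let st := palet2.foldl
      (fun (acc : List (List Int) × Nat) palet =>
        if palet.length = ukuran then (acc.1 ++ [pvSortList palet], acc.2 + 1) else acc)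
      (hasil, insersi)
    if st.2 = palet2.length then st.1
    else susunPaletLoop palet2 st.1 st.2 (ukuran + 1) fuel

def susunPalet (palet2 : List (List Int)) : List (List Int) :=
  susunPaletLoop palet2 [] 0 1 (palet2.foldl (fun acc p => max acc p.length) 0 + 1)

-- ===== PORT B =====
def susunPalet_alt (palet2 : List (List Int)) : List (List Int) :=
  let buckets : PySem.Dict Int (List (List Int)) :=
    palet2.foldl
      (fun d palet =>
        let s := pvSortList palet
        d.modify ((s.length : Int)) [] (· ++ [s]))
      PySem.Dict.empty
  (PySem.List.sorted buckets.keys (fun x => x) false).foldl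
    (fun hasil k => hasil ++ buckets.getD k []) []

-- ===== PRECONDITION & SPEC =====
-- Pre_ excludes inputs containing an empty sublist: there A's counter never reaches len(palet2)
-- (lengths are matched starting from 1) and the 'while True' loop never terminates, while B returns.
def Pre_susunPalet (palet2 : List (List Int)) : Prop := ∀ p ∈ palet2, p ≠ []
instance (palet2 : List (List Int)) : Decidable (Pre_susunPalet palet2) := by unfold Pre_susunPalet; infer_instance
def pvWitness_susunPalet : List (List Int) := [[3, 1], [2], [5, 4, 0], [7]]

def Spec_susunPalet (palet2 : List (List Int)) (out : List (List Int)) : Prop := out = susunPalet_alt palet2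
instance (palet2 : List (List Int)) (out : List (List Int)) : Decidable (Spec_susunPalet palet2 out) := by unfold Spec_susunPalet; infer_instance

-- ===== CLAIM (what is proved, stated in full; the proofs are below) =====
def Claim_equal_susunPalet : Prop := ∀ (palet2 : List (List Int)), Dom_susunPalet palet2 → Pre_susunPalet palet2 → Spec_susunPalet palet2 (susunPalet palet2)

-- ===== LEMMAS AND PROOFS =====

-- the sorted sublists, and the bucket of sorted sublists of (original) length u, in input order
def pvS (palet2 : List (List Int)) : List (List Int) := palet2.map pvSortList
def pvBucket (palet2 : List (List Int)) (u : Nat) : List (List Int) :=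
  (palet2.filter (fun p => p.length = u)).map pvSortList

theorem pvSortList_length (p : List Int) : (pvSortList p).length = p.length := by
  simp [pvSortList, PySem.List.length_sorted]

-- the inner 'for palet in palet2' scan of A at size ukuran = u
theorem pv_scanA (u : Nat) (l : List (List Int)) : ∀ (h : List (List Int)) (i : Nat),
    l.foldl
      (fun (acc : List (List Int) × Nat) palet =>
        if palet.length = u then (acc.1 ++ [pvSortList palet], acc.2 + 1) else acc)
      (h, i)
    = (h ++ (l.filter (fun p => p.length = u)).map pvSortList,
       i + l.countP (fun p => p.length = u)) := by
  induction l with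
  | nil => intro h i; simp
  | cons x t ih =>
    intro h i
    by_cases hx : x.length = u
    · simp [List.foldl_cons, hx, ih]
      omega
    · simp [List.foldl_cons, hx, ih]

theorem pv_countP_merge (l : List (List Int)) (u : Nat) :
    l.countP (fun p => decide (p.length < u)) + l.countP (fun p => p.length = u)
      = l.countP (fun p => decide (p.length < u + 1)) := by
  induction l with
  | nil => simp
  | cons x t ih =>
    simp only [List.countP_cons]
    split_ifs with h1 h2 h3 <;> simp only [decide_eq_true_eq] at * <;> omega

theorem pv_loopA_eq (palet2 : List (List Int)) : ∀ (fuel u : Nat) (h : List (List Int)),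
    (∀ p ∈ palet2, p.length < u + fuel) →
    susunPaletLoop palet2 h (palet2.countP (fun p => decide (p.length < u))) u fuel
      = h ++ (List.range' u fuel).flatMap (pvBucket palet2) := by
  intro fuel
  induction fuel with
  | zero => intro u h _; simp [susunPaletLoop]
  | succ f ih =>
    intro u h hb
    rw [susunPaletLoop]
    simp only [pv_scanA]
    rw [pv_countP_merge]
    by_cases hstop : palet2.countP (fun p => decide (p.length < u + 1)) = palet2.length
    · simp only [hstop]
      have hall : ∀ p ∈ palet2, p.length < u + 1 := by
        have := List.countP_eq_length.mp hstop
        intro p hp; simpa using this p hp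
      have hnil : ∀ k ∈ List.range' (u + 1) f, pvBucket palet2 k = [] := by
        intro k hk
        rcases List.mem_range'.mp hk with ⟨j, hj, rfl⟩
        unfold pvBucket
        have hf : palet2.filter (fun p => p.length = u + 1 + 1 * j) = [] := by
          rw [List.filter_eq_nil_iff]
          intro p hp
          have := hall p hp
          simp only [decide_eq_true_eq]
          omega
        rw [hf]
        rfl
      rw [List.range'_succ, List.flatMap_cons]
      rw [List.flatMap_eq_nil_iff.mpr hnil]
      simp [pvBucket]
    · simp only [if_neg hstop]
      rw [ih (u + 1) _ (by intro p hp; have := hb p hp; omega)]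
      rw [List.range'_succ, List.flatMap_cons]
      simp [pvBucket]

theorem pv_A_char (palet2 : List (List Int)) (hpre : Pre_susunPalet palet2) :
    susunPalet palet2
      = (List.range' 1 (palet2.foldl (fun acc p => max acc p.length) 0 + 1)).flatMap
          (pvBucket palet2) := by
  unfold susunPalet
  have h0 : palet2.countP (fun p => decide (p.length < 1)) = 0 := by
    rw [List.countP_eq_zero]
    intro p hp
    have := List.length_pos_of_ne_nil (hpre p hp)
    simp only [decide_eq_true_eq]
    omega
  have hb : ∀ p ∈ palet2, p.length < 1 + (palet2.foldl (fun acc p => max acc p.length) 0 + 1) := by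
    intro p hp
    have := (PySem.List.le_foldl_max_nat palet2 List.length 0).2 p hp
    omega
  have := pv_loopA_eq palet2 (palet2.foldl (fun acc p => max acc p.length) 0 + 1) 1 [] hb
  rw [h0] at this
  simpa using this

-- the lengths (as Ints) of the sorted sublists, in input order
def pvLs (palet2 : List (List Int)) : List Int := (pvS palet2).map (fun s => (s.length : Int))

theorem pv_buckets_getD (palet2 : List (List Int)) (c : Int) :
    (palet2.foldl
      (fun (d : PySem.Dict Int (List (List Int))) palet =>
        d.modify (((pvSortList palet).length : Int)) [] (· ++ [pvSortList palet]))
      PySem.Dict.empty).getD c []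
    = (pvS palet2).filter (fun s => ((s.length : Int) == c)) := by
  have hmap : palet2.foldl
      (fun (d : PySem.Dict Int (List (List Int))) palet =>
        d.modify (((pvSortList palet).length : Int)) [] (· ++ [pvSortList palet]))
      PySem.Dict.empty
    = (palet2.map (fun palet => (((pvSortList palet).length : Int), pvSortList palet))).foldl
        (fun d pr => d.modify pr.1 [] (· ++ [pr.2])) PySem.Dict.empty := by
    rw [List.foldl_map]
  rw [hmap, PySem.Dict.getD_foldl_modify_append]
  simp only [PySem.Dict.getD_empty, List.nil_append]
  rw [show (palet2.map (fun palet => (((pvSortList palet).length : Int), pvSortList palet)))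
        = (pvS palet2).map (fun s => ((s.length : Int), s)) by simp [pvS, List.map_map]]
  rw [List.filter_map, List.map_map]
  simp [Function.comp_def]

theorem pv_buckets_keys (palet2 : List (List Int)) :
    (palet2.foldl
      (fun (d : PySem.Dict Int (List (List Int))) palet =>
        d.modify (((pvSortList palet).length : Int)) [] (· ++ [pvSortList palet]))
      PySem.Dict.empty).keys
    = PySem.Set.ofList (pvLs palet2) := by
  rw [PySem.Dict.keys_foldl_modify_key (key := fun palet => (((pvSortList palet).length : Int)))]
  rw [PySem.Dict.keys_empty, PySem.Set.update_nil_left]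
  simp [pvLs, pvS, List.map_map]
  rfl

theorem pv_mem_pvLs (palet2 : List (List Int)) (u : Nat) :
    ((u : Int) ∈ pvLs palet2) ↔ ∃ p ∈ palet2, p.length = u := by
  unfold pvLs pvS
  simp [List.map_map, List.mem_map, Function.comp_def, pvSortList_length, Nat.cast_inj]

theorem pv_bucket_empty (palet2 : List (List Int)) (u : Nat)
    (h : ((u : Int) ∈ pvLs palet2) = False) : pvBucket palet2 u = [] := by
  unfold pvBucket
  rw [List.filter_eq_nil_iff.mpr, List.map_nil]
  intro p hp
  simp only [decide_eq_true_eq]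
  intro hlen
  exact (h ▸ (pv_mem_pvLs palet2 u).mpr ⟨p, hp, hlen⟩ : False)

-- dropping the empty buckets from a flatMap
theorem pv_flatMap_filter {α β : Type} (f : α → List β) (q : α → Bool) :
    ∀ l : List α, (∀ x ∈ l, q x = false → f x = []) → l.flatMap f = (l.filter q).flatMap f := by
  intro l
  induction l with
  | nil => simp
  | cons x t ih =>
    intro h
    by_cases hx : q x = true
    · simp [hx, List.flatMap_cons,
        ih (fun y hy hqy => h y (List.mem_cons_of_mem _ hy) hqy)]
    · have hx' : q x = false := by simpa using hx
      simp [hx', h x List.mem_cons_self hx',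
        ih (fun y hy hqy => h y (List.mem_cons_of_mem _ hy) hqy)]

-- the candidate lengths actually present, in increasing order
def pvNs (palet2 : List (List Int)) : List Nat :=
  (List.range' 1 (palet2.foldl (fun acc p => max acc p.length) 0 + 1)).filter
    (fun u => decide ((u : Int) ∈ pvLs palet2))

theorem pv_ks_eq (palet2 : List (List Int)) (hpre : Pre_susunPalet palet2) :
    PySem.List.sorted (PySem.Set.ofList (pvLs palet2)) (fun x => x) false
      = (pvNs palet2).map (fun u : Nat => (u : Int)) := by
  have hpair : ((pvNs palet2).map (fun u : Nat => (u : Int))).Pairwise (· < ·) := by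
    simp only [List.pairwise_map]
    exact ((List.pairwise_lt_range' ..).filter _).imp (fun hab => by exact_mod_cast hab)
  refine PySem.List.sorted_eq_of_perm_of_pairwise_lt _ _ _ ?_ hpair
  apply (List.perm_ext_iff_of_nodup (hpair.imp ne_of_lt) (PySem.Set.nodup_ofList _)).mpr
  intro a
  rw [PySem.Set.mem_ofList]
  constructor
  · intro hm
    rcases List.mem_map.mp hm with ⟨u, hu, rfl⟩
    unfold pvNs at hu
    exact of_decide_eq_true (List.mem_filter.mp hu).2
  · intro ha
    have : ∃ p ∈ palet2, ((p.length : Int)) = a := by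
      unfold pvLs pvS at ha
      simpa [List.map_map, List.mem_map, Function.comp_def, pvSortList_length] using ha
    rcases this with ⟨p, hp, rfl⟩
    refine List.mem_map.mpr ⟨p.length, ?_, rfl⟩
    unfold pvNs
    rw [List.mem_filter]
    constructor
    · rw [List.mem_range'_1]
      have h1 := List.length_pos_of_ne_nil (hpre p hp)
      have h2 := (PySem.List.le_foldl_max_nat palet2 List.length 0).2 p hp
      omega
    · exact decide_eq_true ((pv_mem_pvLs palet2 p.length).mpr ⟨p, hp, rfl⟩)

-- ===== VERDICT (by name: the statement is the Claim_ definition above) =====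
theorem susunPalet_spec : Claim_equal_susunPalet := by
  intro palet2 _ hpre
  unfold Spec_susunPalet
  rw [pv_A_char palet2 hpre]
  simp only [susunPalet_alt]
  rw [pv_buckets_keys, pv_ks_eq palet2 hpre]
  simp only [pv_buckets_getD]
  rw [PySem.List.foldl_append_eq_flatMap, List.nil_append, List.flatMap_map]
  have hpt : ∀ u : Nat, (pvS palet2).filter (fun s => ((s.length : Int) == (u : Int)))
      = pvBucket palet2 u := by
    intro u
    unfold pvBucket pvS
    rw [List.filter_map]
    congr 1
    apply List.filter_congr
    intro p _
    by_cases h : p.length = u <;>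
      simp [pvSortList_length, h, Nat.cast_inj]
  simp only [hpt]
  rw [pv_flatMap_filter (pvBucket palet2) (fun u => decide ((u : Int) ∈ pvLs palet2)) _
    (fun u _ hq => pv_bucket_empty palet2 u (by simpa using hq))]
  rfl
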